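-- pv_equiv track=rewrite | github.com/AdrianSuliga/WDI | Kolokwia/ex_A4_22-23.py | countChecks
-- ===== SOURCE A (Python) =====
-- def countChecks(n, T):
--     moves = [(2,1), (2,-1), (-2,1), (-2,-1), (1,2), (1,-2), (-1,2), (-1,-2)]
--     for i in range(n):
--         for j in range(n):
--             if T[i][j] == 1 or T[i][j] == 3:
--                 for move in moves:
--                     if -1 < i + move[0] < n and -1 < j + move[1] < n and T[i+move[0]][j+move[1]] == 0:
--                         T[i + move[0]][j + move[1]] = 2 # jeżeli pole puste jest szachowane, to zapisz tam 2
--                     elif -1 < i + move[0] < n and -1 < j + move[1] < n and T[i + move[0]][j + move[1]] == 1: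
--                         T[i + move[0]][j + move[1]] = 3 # jeżeli pole ze skoczkiem jest szachowane to zapisz tam 3
--     cnt = 0
--     for i in range(n):
--         for j in range(n):
--             if T[i][j] == 2 or T[i][j] == 3:
--                 T[i][j] -= 2 # zliczamy szachowane pola i odwracamy wprowadzone dane tak aby tablica była niezmieniona
--                 cnt += 1
--     return cnt
-- ===== SOURCE B (Python) =====
-- def countChecks(n, T):
--     moves = [(2, 1), (2, -1), (-2, 1), (-2, -1), (1, 2), (1, -2), (-1, 2), (-1, -2)]
--     knights = {(i, j) for i in range(n) for j in range(n) if T[i][j] == 1}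
--     return sum(1 for i in range(n) for j in range(n)
--                if any((i + a, j + b) in knights for a, b in moves))
-- ===== Notes on version B (the rewrite author's own statement) =====
-- stated objective: simpler
-- what changed: B replaces A's two-phase mutate-mark-then-count-and-restore scheme by a read-only gather: collect the knight cells into a set once, then count every cell that has a knight a knight-move away; Pre_ restricts to boards encoded with 0 (empty) / 1 (knight), because on boards already containing A's in-band mark values 2/3 A counts those cells unconditionally and treats 3 as a knight, an artefact of its sentinel encoding that a read-only implementation has no reason to reproduce.
-- outside the precondition, e.g. on countChecks(2, [[2, 0], [0, 0]]): A returns 1, B returns 0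
import Mathlib
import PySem

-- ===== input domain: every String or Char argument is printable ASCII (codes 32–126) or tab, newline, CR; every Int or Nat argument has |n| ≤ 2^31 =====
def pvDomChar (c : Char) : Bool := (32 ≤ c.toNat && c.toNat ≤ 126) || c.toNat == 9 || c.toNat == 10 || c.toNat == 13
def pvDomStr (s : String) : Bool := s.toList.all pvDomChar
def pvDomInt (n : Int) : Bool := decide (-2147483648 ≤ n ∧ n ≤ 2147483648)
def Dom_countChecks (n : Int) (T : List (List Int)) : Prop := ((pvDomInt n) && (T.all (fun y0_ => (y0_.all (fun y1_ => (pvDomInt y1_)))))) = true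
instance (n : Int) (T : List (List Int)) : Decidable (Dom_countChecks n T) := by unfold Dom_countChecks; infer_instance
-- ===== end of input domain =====

-- B replaces A's mutate-mark-then-restore scheme by a read-only gather over a
-- precomputed knight set (objective: simpler).  The equivalence is about the RETURN
-- value only; on Pre_ boards A's marks are all undone, so A's net mutation is nil.

-- ===== PORT A =====
def pvMoves : List (Int × Int) := [(2,1),(2,-1),(-2,1),(-2,-1),(1,2),(1,-2),(-1,2),(-1,-2)]

-- T[i][j] (read) and T[i][j] = v (write), Int indices as in the Python
def pvGet (T : List (List Int)) (i j : Int) : Int :=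
  PySem.List.pyGetD (PySem.List.pyGetD T i []) j 0

def pvSet (T : List (List Int)) (i j : Int) (v : Int) : List (List Int) :=
  PySem.List.pySetD T i (PySem.List.pySetD (PySem.List.pyGetD T i []) j v)

-- body of A's innermost 'for move in moves' loop
def pvMarkMove (n i j : Int) (T : List (List Int)) (m : Int × Int) : List (List Int) :=
  if -1 < i + m.1 ∧ i + m.1 < n ∧ -1 < j + m.2 ∧ j + m.2 < n ∧ pvGet T (i + m.1) (j + m.2) = 0 then
    pvSet T (i + m.1) (j + m.2) 2
  else if -1 < i + m.1 ∧ i + m.1 < n ∧ -1 < j + m.2 ∧ j + m.2 < n ∧ pvGet T (i + m.1) (j + m.2) = 1 then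
    pvSet T (i + m.1) (j + m.2) 3
  else T

def countChecks (n : Int) (T : List (List Int)) : Int :=
  let moves := pvMoves
  -- phase 1: mark
  let T1 := (PySem.List.pyRange 0 n 1).foldl (fun T i =>
    (PySem.List.pyRange 0 n 1).foldl (fun T j =>
      if pvGet T i j = 1 ∨ pvGet T i j = 3 then moves.foldl (pvMarkMove n i j) T else T) T) T
  -- phase 2: count and restore
  let st := (PySem.List.pyRange 0 n 1).foldl (fun st i =>
    (PySem.List.pyRange 0 n 1).foldl (fun (st : List (List Int) × Int) j =>
      if pvGet st.1 i j = 2 ∨ pvGet st.1 i j = 3 then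
        (pvSet st.1 i j (pvGet st.1 i j - 2), st.2 + 1)
      else st) st) (T1, (0 : Int))
  st.2

-- ===== PORT B =====
def countChecks_alt (n : Int) (T : List (List Int)) : Int :=
  let moves := pvMoves
  let knights : PySem.Set (Int × Int) :=
    PySem.Set.ofList ((PySem.List.pyRange 0 n 1).flatMap (fun i =>
      ((PySem.List.pyRange 0 n 1).filter (fun j => pvGet T i j = 1)).map (fun j => (i, j))))
  (PySem.List.pyRange 0 n 1).foldl (fun cnt i =>
    (PySem.List.pyRange 0 n 1).foldl (fun (cnt : Int) j =>
      if moves.any (fun m => PySem.Set.contains knights (i + m.1, j + m.2)) then cnt + 1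
      else cnt) cnt) 0

-- ===== PRECONDITION & SPEC =====
-- Pre_ requires the indexed n×n region to exist (A raises IndexError otherwise) and
-- to hold only the board encoding 0 = empty / 1 = knight: on boards already containing
-- A's in-band mark values 2/3, A counts those cells unconditionally and treats 3 as a
-- knight — an artefact of its sentinel marking that is excluded here.
def Pre_countChecks (n : Int) (T : List (List Int)) : Prop :=
  n ≤ (T.length : Int) ∧ ∀ row ∈ T.take n.toNat,
    n ≤ (row.length : Int) ∧ ∀ v ∈ row.take n.toNat, v = 0 ∨ v = 1
instance (n : Int) (T : List (List Int)) : Decidable (Pre_countChecks n T) := by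
  unfold Pre_countChecks; infer_instance

def pvWitness_countChecks : Int × List (List Int) := (2, [[1, 0], [0, 0]])

def Spec_countChecks (n : Int) (T : List (List Int)) (out : Int) : Prop := out = countChecks_alt n T
instance (n : Int) (T : List (List Int)) (out : Int) : Decidable (Spec_countChecks n T out) := by
  unfold Spec_countChecks; infer_instance

-- ===== CLAIM (what is proved, stated in full; the proofs are below) =====
def Claim_equal_countChecks : Prop := ∀ (n : Int) (T : List (List Int)), Dom_countChecks n T → Pre_countChecks n T → Spec_countChecks n T (countChecks n T)

-- ===== LEMMAS AND PROOFS =====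

-- value of a cell after A's marking phase: original value v, a = "already attacked"
def markVal (v : Int) (a : Bool) : Int :=
  if a then (if v = 0 then 2 else if v = 1 then 3 else v) else v

-- "t is a knight-move away from some cell in D"
def attBy (D : List (Int × Int)) (t : Int × Int) : Bool :=
  D.any (fun k => pvMoves.any (fun m => decide (k.1 + m.1 = t.1 ∧ k.2 + m.2 = t.2)))

def Shape (T T0 : List (List Int)) : Prop :=
  T.length = T0.length ∧ ∀ k : Nat, (T.getD k []).length = (T0.getD k []).length

def cellsOf (n : Int) : List (Int × Int) :=
  (PySem.List.pyRange 0 n 1).flatMap (fun i => (PySem.List.pyRange 0 n 1).map (fun j => (i, j)))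

-- loop bodies of the two ports, as functions of one cell
def stepA (n : Int) (T : List (List Int)) (c : Int × Int) : List (List Int) :=
  if pvGet T c.1 c.2 = 1 ∨ pvGet T c.1 c.2 = 3 then pvMoves.foldl (pvMarkMove n c.1 c.2) T else T

def stepC (st : List (List Int) × Int) (c : Int × Int) : List (List Int) × Int :=
  if pvGet st.1 c.1 c.2 = 2 ∨ pvGet st.1 c.1 c.2 = 3 then
    (pvSet st.1 c.1 c.2 (pvGet st.1 c.1 c.2 - 2), st.2 + 1)
  else st

-- knight cells of the original board, as A sees them (in row-major order)
def knightsOf (n : Int) (T0 : List (List Int)) : List (Int × Int) :=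
  (cellsOf n).filter (fun c => decide (pvGet T0 c.1 c.2 = 1 ∨ pvGet T0 c.1 c.2 = 3))

-- invariant of the marking phase, for a general "already attacked" predicate P
def InvP (n : Int) (T0 T : List (List Int)) (P : Int × Int → Bool) : Prop :=
  Shape T T0 ∧ ∀ x y : Int, 0 ≤ x → x < n → 0 ≤ y → y < n →
    pvGet T x y = markVal (pvGet T0 x y) (P (x, y))

theorem foldl_nested {α β γ : Type} (l1 : List α) (l2 : List β) (g : γ → α × β → γ) (init : γ) :
    l1.foldl (fun s i => l2.foldl (fun s j => g s (i, j)) s) init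
      = (l1.flatMap (fun i => l2.map (fun j => (i, j)))).foldl g init := by
  induction l1 generalizing init with
  | nil => rfl
  | cons a l ih => simp [List.foldl_append, List.foldl_map, ih]

theorem mem_cellsOf (n : Int) (c : Int × Int) :
    c ∈ cellsOf n ↔ (0 ≤ c.1 ∧ c.1 < n) ∧ (0 ≤ c.2 ∧ c.2 < n) := by
  cases c with
  | mk a b => simp [cellsOf, List.mem_flatMap, PySem.List.mem_pyRange_one]

theorem nodup_cellsOf (n : Int) : (cellsOf n).Nodup :=
  List.Nodup.product (PySem.List.nodup_pyRange_one 0 n) (PySem.List.nodup_pyRange_one 0 n)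

theorem pvGet_pvSet (T : List (List Int)) (a b v x y : Int)
    (ha : 0 ≤ a) (ha2 : a.toNat < T.length) (hb : 0 ≤ b) (hb2 : b.toNat < (T.getD a.toNat []).length)
    (hx : 0 ≤ x) (hy : 0 ≤ y) :
    pvGet (pvSet T a b v) x y = if x = a ∧ y = b then v else pvGet T x y := by
  simp only [pvGet, pvSet, PySem.List.pySetD_of_nonneg _ _ ha, PySem.List.pySetD_of_nonneg _ _ hb,
    PySem.List.pyGetD_of_nonneg _ _ ha, PySem.List.pyGetD_of_nonneg _ _ hx,
    PySem.List.pyGetD_of_nonneg _ _ hy]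
  simp only [List.getD_eq_getElem?_getD, List.getElem?_set]
  by_cases h1 : a.toNat = x.toNat
  · have hxa : x = a := by omega
    have ha2' : x.toNat < T.length := by omega
    simp only [h1, if_pos rfl, ha2', if_true, Option.getD_some]
    by_cases h2 : b.toNat = y.toNat
    · have hyb : y = b := by omega
      have hlt : y.toNat < (T[a.toNat]?.getD []).length := by
        rw [← List.getD_eq_getElem?_getD]; omega
      simp [List.getElem?_set, hlt, h2, hxa, hyb]
    · have : ¬ (x = a ∧ y = b) := by omega
      simp [h2, this, h1]
  · have : ¬ (x = a ∧ y = b) := by omega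
    simp [h1, this]

theorem shape_pvSet (T T0 : List (List Int)) (a b v : Int) (h : Shape T T0) (ha : 0 ≤ a) (hb : 0 ≤ b) :
    Shape (pvSet T a b v) T0 := by
  obtain ⟨hl, hr⟩ := h
  constructor
  · simp [pvSet, PySem.List.pySetD_of_nonneg _ _ ha, hl]
  · intro k
    simp only [pvSet, PySem.List.pySetD_of_nonneg _ _ ha, PySem.List.pySetD_of_nonneg _ _ hb,
      PySem.List.pyGetD_of_nonneg _ _ ha]
    simp only [List.getD_eq_getElem?_getD, List.getElem?_set]
    by_cases hk : a.toNat = k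
    · subst hk
      by_cases hlen : a.toNat < T.length
      · simpa [hlen] using hr a.toNat
      · have h0 : T0.length ≤ a.toNat := by omega
        have := hr a.toNat
        simp only [List.getD_eq_getElem?_getD] at this ⊢
        simp [hlen, List.getElem?_eq_none h0, List.getElem?_eq_none (by omega : T.length ≤ a.toNat)] at this ⊢
    · simpa [hk] using hr k

theorem markVal_eq_zero {v : Int} {p : Bool} (h : markVal v p = 0) : v = 0 := by
  unfold markVal at h; split_ifs at h <;> omega

theorem markVal_eq_one {v : Int} {p : Bool} (h : markVal v p = 1) : v = 1 := by
  unfold markVal at h; split_ifs at h <;> omega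

theorem markVal_stable {v : Int} {p : Bool} (h0 : markVal v p ≠ 0) (h1 : markVal v p ≠ 1) :
    markVal v true = markVal v p := by
  unfold markVal at h0 h1 ⊢
  cases p
  · simp only [Bool.false_eq_true, if_false] at h0 h1 ⊢
    simp only [if_true]
    split_ifs <;> omega
  · rfl

theorem isK_markVal (v : Int) (a : Bool) :
    ((markVal v a = 1 ∨ markVal v a = 3) ↔ (v = 1 ∨ v = 3)) := by
  unfold markVal; cases a <;> [simp; skip] <;> split_ifs <;> omega

theorem markVal_mem23 (v : Int) (p : Bool) :
    (markVal v p = 2 ∨ markVal v p = 3) ↔ ((v = 2 ∨ v = 3) ∨ ((v = 0 ∨ v = 1) ∧ p = true)) := by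
  unfold markVal; cases p
  · simp
  · simp only [if_true]; split_ifs <;> simp_all

theorem attBy_append_singleton (D : List (Int × Int)) (c t : Int × Int) :
    attBy (D ++ [c]) t = (attBy D t || pvMoves.any (fun m => decide (c.1 + m.1 = t.1 ∧ c.2 + m.2 = t.2))) := by
  simp [attBy, List.any_append]

theorem pvMoves_neg_mem {m : Int × Int} (h : m ∈ pvMoves) : ((-m.1, -m.2) : Int × Int) ∈ pvMoves := by
  fin_cases h <;> decide

-- symmetry of the knight-move set: scatter attack = gather attack
theorem attBy_symm (D : List (Int × Int)) (t : Int × Int) :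
    attBy D t = pvMoves.any (fun m => decide ((t.1 + m.1, t.2 + m.2) ∈ D)) := by
  rw [Bool.eq_iff_iff]
  simp only [attBy, List.any_eq_true, decide_eq_true_eq]
  constructor
  · rintro ⟨k, hk, m, hm, h1, h2⟩
    refine ⟨(-m.1, -m.2), pvMoves_neg_mem hm, ?_⟩
    have : (t.1 + -m.1, t.2 + -m.2) = k := by
      cases k; simp_all; omega
    rw [this]; exact hk
  · rintro ⟨m, hm, hmem⟩
    exact ⟨(t.1 + m.1, t.2 + m.2), hmem, (-m.1, -m.2), pvMoves_neg_mem hm, by omega, by omega⟩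

-- bounds from the precondition through a shape-preserved board
theorem pv_bounds {n : Int} {T0 T : List (List Int)} (hPre : Pre_countChecks n T0)
    (hS : Shape T T0) {i j : Int} (hi0 : 0 ≤ i) (hi : i < n) (hj0 : 0 ≤ j) (hj : j < n) :
    i.toNat < T.length ∧ j.toNat < (T.getD i.toNat []).length := by
  obtain ⟨h1, h2⟩ := hPre
  have hlen : i.toNat < T0.length := by omega
  have hrow : T0.getD i.toNat [] ∈ T0.take n.toNat := by
    have h3 : i.toNat < n.toNat := by omega
    have h4 : i.toNat < (T0.take n.toNat).length := by simp; omega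
    have : (T0.take n.toNat)[i.toNat] = T0[i.toNat] := List.getElem_take
    have h5 : T0.getD i.toNat [] = T0[i.toNat] := List.getD_eq_getElem _ _ hlen
    rw [h5, ← this]
    exact List.getElem_mem h4
  have hrlen := (h2 _ hrow).1
  have hTl := hS.1
  refine ⟨by omega, ?_⟩
  rw [hS.2 i.toNat]
  omega

-- cell values of the original board, from the precondition
theorem pv_val {n : Int} {T0 : List (List Int)} (hPre : Pre_countChecks n T0)
    {i j : Int} (hi0 : 0 ≤ i) (hi : i < n) (hj0 : 0 ≤ j) (hj : j < n) :
    pvGet T0 i j = 0 ∨ pvGet T0 i j = 1 := by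
  obtain ⟨h1, h2⟩ := hPre
  have hlen : i.toNat < T0.length := by omega
  have hrow : T0.getD i.toNat [] ∈ T0.take n.toNat := by
    have h4 : i.toNat < (T0.take n.toNat).length := by simp; omega
    have h6 : (T0.take n.toNat)[i.toNat] = T0[i.toNat] := List.getElem_take
    have h5 : T0.getD i.toNat [] = T0[i.toNat] := List.getD_eq_getElem _ _ hlen
    rw [h5, ← h6]
    exact List.getElem_mem h4
  obtain ⟨hrl, hrv⟩ := h2 _ hrow
  have hjlen : j.toNat < (T0.getD i.toNat []).length := by omega
  have hmem : (T0.getD i.toNat []).getD j.toNat 0 ∈ (T0.getD i.toNat []).take n.toNat := by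
    have h4 : j.toNat < ((T0.getD i.toNat []).take n.toNat).length := by
      rw [List.length_take]; omega
    have h6 : ((T0.getD i.toNat []).take n.toNat)[j.toNat] = (T0.getD i.toNat [])[j.toNat] :=
      List.getElem_take
    have h5 : (T0.getD i.toNat []).getD j.toNat 0 = (T0.getD i.toNat [])[j.toNat] :=
      List.getD_eq_getElem _ _ hjlen
    rw [h5, ← h6]
    exact List.getElem_mem h4
  have := hrv _ hmem
  simpa [pvGet, PySem.List.pyGetD_of_nonneg _ _ hi0, PySem.List.pyGetD_of_nonneg _ _ hj0] using this

-- one knight's 8-move marking loop, for an arbitrary already-attacked predicate P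
theorem inner_marks {n : Int} {T0 : List (List Int)} (hPre : Pre_countChecks n T0)
    (ms : List (Int × Int)) (i j : Int) (hi0 : 0 ≤ i) (hi : i < n) (hj0 : 0 ≤ j) (hj : j < n)
    (T : List (List Int)) (P : Int × Int → Bool) (hInv : InvP n T0 T P) :
    InvP n T0 (ms.foldl (pvMarkMove n i j) T)
      (fun t => P t || ms.any (fun m => decide (i + m.1 = t.1 ∧ j + m.2 = t.2))) := by
  induction ms generalizing T P with
  | nil =>
    refine ⟨hInv.1, fun x y hx hxn hy hyn => ?_⟩
    beta_reduce
    simpa using hInv.2 x y hx hxn hy hyn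
  | cons m ms ih =>
    simp only [List.foldl_cons, List.any_cons]
    have key : InvP n T0 (pvMarkMove n i j T m)
        (fun t => P t || decide (i + m.1 = t.1 ∧ j + m.2 = t.2)) := by
      unfold pvMarkMove
      by_cases hr : -1 < i + m.1 ∧ i + m.1 < n ∧ -1 < j + m.2 ∧ j + m.2 < n
      · have hb := pv_bounds hPre hInv.1 (i := i + m.1) (j := j + m.2)
          (by omega) (by omega) (by omega) (by omega)
        have hv := hInv.2 (i + m.1) (j + m.2) (by omega) (by omega) (by omega) (by omega)
        by_cases h0 : pvGet T (i + m.1) (j + m.2) = 0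
        · rw [if_pos ⟨hr.1, hr.2.1, hr.2.2.1, hr.2.2.2, h0⟩]
          refine ⟨shape_pvSet _ _ _ _ _ hInv.1 (by omega) (by omega),
            fun x y hx hxn hy hyn => ?_⟩
          beta_reduce
          rw [pvGet_pvSet _ _ _ _ _ _ (by omega) hb.1 (by omega) hb.2 hx hy]
          by_cases hxy : x = i + m.1 ∧ y = j + m.2
          · rw [if_pos hxy]
            have hv0 : pvGet T0 (i + m.1) (j + m.2) = 0 :=
              markVal_eq_zero (p := P (i + m.1, j + m.2)) (by rw [← hv]; exact h0)
            obtain ⟨rfl, rfl⟩ := hxy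
            simp [hv0, markVal]
          · rw [if_neg hxy]
            have hd : decide (i + m.1 = x ∧ j + m.2 = y) = false := decide_eq_false (by omega)
            rw [hInv.2 x y hx hxn hy hyn, hd, Bool.or_false]
        · by_cases h1 : pvGet T (i + m.1) (j + m.2) = 1
          · rw [if_neg (by tauto), if_pos ⟨hr.1, hr.2.1, hr.2.2.1, hr.2.2.2, h1⟩]
            refine ⟨shape_pvSet _ _ _ _ _ hInv.1 (by omega) (by omega),
              fun x y hx hxn hy hyn => ?_⟩
            beta_reduce
            rw [pvGet_pvSet _ _ _ _ _ _ (by omega) hb.1 (by omega) hb.2 hx hy]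
            by_cases hxy : x = i + m.1 ∧ y = j + m.2
            · rw [if_pos hxy]
              have hv1 : pvGet T0 (i + m.1) (j + m.2) = 1 :=
                markVal_eq_one (p := P (i + m.1, j + m.2)) (by rw [← hv]; exact h1)
              obtain ⟨rfl, rfl⟩ := hxy
              simp [hv1, markVal]
            · rw [if_neg hxy]
              have hd : decide (i + m.1 = x ∧ j + m.2 = y) = false := decide_eq_false (by omega)
              rw [hInv.2 x y hx hxn hy hyn, hd, Bool.or_false]
          · rw [if_neg (by tauto), if_neg (by tauto)]
            refine ⟨hInv.1, fun x y hx hxn hy hyn => ?_⟩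
            beta_reduce
            rw [hInv.2 x y hx hxn hy hyn]
            by_cases hxy : i + m.1 = x ∧ j + m.2 = y
            · have hd : decide (i + m.1 = x ∧ j + m.2 = y) = true := decide_eq_true hxy
              rw [hd, Bool.or_true]
              obtain ⟨e1, e2⟩ := hxy
              have hvxy := hInv.2 x y hx hxn hy hyn
              have hcur0 : markVal (pvGet T0 x y) (P (x, y)) ≠ 0 := by
                rw [← hvxy, ← e1, ← e2]; exact h0
              have hcur1 : markVal (pvGet T0 x y) (P (x, y)) ≠ 1 := by
                rw [← hvxy, ← e1, ← e2]; exact h1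
              exact (markVal_stable hcur0 hcur1).symm
            · have hd : decide (i + m.1 = x ∧ j + m.2 = y) = false := decide_eq_false hxy
              rw [hd, Bool.or_false]
      · rw [if_neg (by tauto), if_neg (by tauto)]
        refine ⟨hInv.1, fun x y hx hxn hy hyn => ?_⟩
        beta_reduce
        have hd : decide (i + m.1 = x ∧ j + m.2 = y) = false := decide_eq_false (by omega)
        rw [hInv.2 x y hx hxn hy hyn, hd, Bool.or_false]
    have h2 := ih _ _ key
    refine ⟨h2.1, fun x y hx hxn hy hyn => ?_⟩
    beta_reduce
    rw [h2.2 x y hx hxn hy hyn]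
    simp only [Bool.or_assoc]

-- the outer marking double loop
theorem outer_marks {n : Int} {T0 : List (List Int)} (hPre : Pre_countChecks n T0)
    (L : List (Int × Int)) (hL : ∀ c ∈ L, (0 ≤ c.1 ∧ c.1 < n) ∧ (0 ≤ c.2 ∧ c.2 < n))
    (T : List (List Int)) (D : List (Int × Int)) (hInv : InvP n T0 T (attBy D)) :
    InvP n T0 (L.foldl (stepA n) T)
      (attBy (D ++ L.filter (fun c => decide (pvGet T0 c.1 c.2 = 1 ∨ pvGet T0 c.1 c.2 = 3)))) := by
  induction L generalizing T D with
  | nil => simpa using hInv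
  | cons c L ih =>
    obtain ⟨⟨hc1, hc2⟩, hc3, hc4⟩ := hL c (List.mem_cons_self ..)
    have hLtail : ∀ c' ∈ L, (0 ≤ c'.1 ∧ c'.1 < n) ∧ (0 ≤ c'.2 ∧ c'.2 < n) :=
      fun c' hc' => hL c' (List.mem_cons_of_mem _ hc')
    have hv := hInv.2 c.1 c.2 hc1 hc2 hc3 hc4
    simp only [List.foldl_cons, List.filter_cons]
    by_cases hk : pvGet T0 c.1 c.2 = 1 ∨ pvGet T0 c.1 c.2 = 3
    · have hkT : pvGet T c.1 c.2 = 1 ∨ pvGet T c.1 c.2 = 3 := by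
        rw [hv]; exact (isK_markVal _ _).2 hk
      have key := inner_marks hPre pvMoves c.1 c.2 hc1 hc2 hc3 hc4 T (attBy D) hInv
      have key' : InvP n T0 (pvMoves.foldl (pvMarkMove n c.1 c.2) T) (attBy (D ++ [c])) := by
        refine ⟨key.1, fun x y hx hxn hy hyn => ?_⟩
        rw [key.2 x y hx hxn hy hyn]
        simp only [attBy_append_singleton]
      have hres := ih hLtail _ _ key'
      rw [List.append_assoc] at hres
      simp only [List.cons_append, List.nil_append] at hres
      simp only [stepA, if_pos hkT, decide_eq_true hk, if_pos]
      exact hres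
    · have hkT : ¬(pvGet T c.1 c.2 = 1 ∨ pvGet T c.1 c.2 = 3) := by
        rw [hv]; exact fun hcon => hk ((isK_markVal _ _).1 hcon)
      have hres := ih hLtail T D hInv
      simp only [stepA, if_neg hkT, decide_eq_false hk, Bool.false_eq_true, if_neg,
        not_false_eq_true]
      exact hres

-- the counting phase, against the abstract description of the marked board
theorem count_phase {n : Int} {T0 : List (List Int)} (hPre : Pre_countChecks n T0)
    (q : Int × Int → Bool)
    (L : List (Int × Int)) (hnd : L.Nodup)
    (hL : ∀ c ∈ L, (0 ≤ c.1 ∧ c.1 < n) ∧ (0 ≤ c.2 ∧ c.2 < n))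
    (T : List (List Int)) (cnt : Int) (hS : Shape T T0)
    (hagree : ∀ c ∈ L, pvGet T c.1 c.2 = markVal (pvGet T0 c.1 c.2) (q c)) :
    (L.foldl stepC (T, cnt)).2
      = cnt + (L.countP (fun c => decide (markVal (pvGet T0 c.1 c.2) (q c) = 2 ∨
          markVal (pvGet T0 c.1 c.2) (q c) = 3)) : Int) := by
  induction L generalizing T cnt with
  | nil => simp
  | cons c L ih =>
    obtain ⟨⟨hc1, hc2⟩, hc3, hc4⟩ := hL c (List.mem_cons_self ..)
    have hLtail : ∀ c' ∈ L, (0 ≤ c'.1 ∧ c'.1 < n) ∧ (0 ≤ c'.2 ∧ c'.2 < n) :=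
      fun c' hc' => hL c' (List.mem_cons_of_mem _ hc')
    obtain ⟨hcL, hndL⟩ := List.nodup_cons.1 hnd
    have hag := hagree c (List.mem_cons_self ..)
    simp only [List.foldl_cons, List.countP_cons, stepC]
    by_cases hcase : pvGet T c.1 c.2 = 2 ∨ pvGet T c.1 c.2 = 3
    · rw [if_pos hcase]
      have hb := pv_bounds hPre hS hc1 hc2 hc3 hc4
      have hS' : Shape (pvSet T c.1 c.2 (pvGet T c.1 c.2 - 2)) T0 :=
        shape_pvSet _ _ _ _ _ hS (by omega) (by omega)
      have hagree' : ∀ c' ∈ L, pvGet (pvSet T c.1 c.2 (pvGet T c.1 c.2 - 2)) c'.1 c'.2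
          = markVal (pvGet T0 c'.1 c'.2) (q c') := by
        intro c' hc'
        obtain ⟨⟨h1', h2'⟩, h3', h4'⟩ := hLtail c' hc'
        rw [pvGet_pvSet _ _ _ _ _ _ (by omega) hb.1 (by omega) hb.2 (by omega) (by omega)]
        have hne : ¬(c'.1 = c.1 ∧ c'.2 = c.2) := by
          rintro ⟨e1, e2⟩
          exact hcL (Prod.ext e1 e2 ▸ hc')
        rw [if_neg hne]
        exact hagree c' (List.mem_cons_of_mem _ hc')
      rw [ih hndL hLtail _ _ hS' hagree']
      have hd : decide (markVal (pvGet T0 c.1 c.2) (q c) = 2 ∨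
          markVal (pvGet T0 c.1 c.2) (q c) = 3) = true := decide_eq_true (by rw [← hag]; exact hcase)
      rw [hd]
      simp only [if_true]
      push_cast
      ring
    · rw [if_neg hcase]
      rw [ih hndL hLtail _ _ hS (fun c' hc' => hagree c' (List.mem_cons_of_mem _ hc'))]
      have hd : decide (markVal (pvGet T0 c.1 c.2) (q c) = 2 ∨
          markVal (pvGet T0 c.1 c.2) (q c) = 3) = false := decide_eq_false (by rw [← hag]; exact hcase)
      rw [hd]
      simp

def knightsB (n : Int) (T0 : List (List Int)) : PySem.Set (Int × Int) :=
  PySem.Set.ofList ((PySem.List.pyRange 0 n 1).flatMap (fun i =>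
    ((PySem.List.pyRange 0 n 1).filter (fun j => pvGet T0 i j = 1)).map (fun j => (i, j))))

abbrev condB (n : Int) (T0 : List (List Int)) (c : Int × Int) : Prop :=
  pvMoves.any (fun m => PySem.Set.contains (knightsB n T0) (c.1 + m.1, c.2 + m.2))

def stepB (n : Int) (T0 : List (List Int)) (cnt : Int) (c : Int × Int) : Int :=
  if condB n T0 c then cnt + 1 else cnt

theorem stepB_count (n : Int) (T0 : List (List Int)) (l : List (Int × Int)) (a : Int) :
    l.foldl (stepB n T0) a = a + (l.countP (fun c => decide (condB n T0 c)) : Int) := by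
  induction l generalizing a with
  | nil => simp
  | cons c l ih =>
    simp only [List.foldl_cons, List.countP_cons, ih, stepB]
    by_cases h : condB n T0 c
    · rw [if_pos h, if_pos (decide_eq_true h)]
      push_cast; ring
    · rw [if_neg h, if_neg (fun hc => h (of_decide_eq_true hc))]
      simp

theorem countChecks_eq (n : Int) (T0 : List (List Int)) :
    countChecks n T0 = ((cellsOf n).foldl stepC ((cellsOf n).foldl (stepA n) T0, (0 : Int))).2 := by
  have h1 := foldl_nested (PySem.List.pyRange 0 n 1) (PySem.List.pyRange 0 n 1) (stepA n) T0
  have h2 := foldl_nested (PySem.List.pyRange 0 n 1) (PySem.List.pyRange 0 n 1) stepC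
      ((PySem.List.pyRange 0 n 1).foldl
        (fun T i => (PySem.List.pyRange 0 n 1).foldl (fun T j => stepA n T (i, j)) T) T0, (0 : Int))
  show ((PySem.List.pyRange 0 n 1).foldl
      (fun st i => (PySem.List.pyRange 0 n 1).foldl (fun st j => stepC st (i, j)) st)
      ((PySem.List.pyRange 0 n 1).foldl
        (fun T i => (PySem.List.pyRange 0 n 1).foldl (fun T j => stepA n T (i, j)) T) T0, (0 : Int))).2 = _
  rw [h2, h1]
  rfl

theorem countChecks_alt_eq (n : Int) (T0 : List (List Int)) :
    countChecks_alt n T0 = ((cellsOf n).countP (fun c => decide (condB n T0 c)) : Int) := by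
  have h1 := foldl_nested (PySem.List.pyRange 0 n 1) (PySem.List.pyRange 0 n 1) (stepB n T0) (0 : Int)
  show (PySem.List.pyRange 0 n 1).foldl
      (fun cnt i => (PySem.List.pyRange 0 n 1).foldl (fun cnt j => stepB n T0 cnt (i, j)) cnt) (0 : Int) = _
  rw [h1, stepB_count, zero_add]
  rfl

-- membership of B's knight set = the value-1 cells
theorem knight_set_mem (n : Int) (T0 : List (List Int)) (t : Int × Int) :
    t ∈ knightsB n T0 ↔ t ∈ (cellsOf n).filter (fun c => decide (pvGet T0 c.1 c.2 = 1)) := by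
  cases t with
  | mk a b =>
    simp [knightsB, PySem.Set.mem_ofList, cellsOf, List.mem_filter, List.mem_flatMap,
      List.mem_map, PySem.List.mem_pyRange_one]
    tauto

-- under Pre_, A's knight list (value 1 or 3) is exactly the value-1 cells
theorem knights_eq {n : Int} {T0 : List (List Int)} (hPre : Pre_countChecks n T0) :
    knightsOf n T0 = (cellsOf n).filter (fun c => decide (pvGet T0 c.1 c.2 = 1)) := by
  unfold knightsOf
  apply List.filter_congr
  intro c hc
  obtain ⟨⟨h1, h2⟩, h3, h4⟩ := (mem_cellsOf n c).1 hc
  have hv := pv_val hPre h1 h2 h3 h4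
  rw [decide_eq_decide]
  omega

-- ===== VERDICT (by name: the statement is the Claim_ definition above) =====
theorem countChecks_spec : Claim_equal_countChecks := by
  intro n T0 hDom hPre
  unfold Spec_countChecks
  rw [countChecks_eq, countChecks_alt_eq]
  have hcells : ∀ c ∈ cellsOf n, (0 ≤ c.1 ∧ c.1 < n) ∧ (0 ≤ c.2 ∧ c.2 < n) :=
    fun c hc => (mem_cellsOf n c).1 hc
  have hInv0 : InvP n T0 T0 (attBy []) := by
    refine ⟨⟨rfl, fun _ => rfl⟩, fun x y _ _ _ _ => ?_⟩
    simp [attBy, markVal]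
  have hmark := outer_marks hPre (cellsOf n) hcells T0 [] hInv0
  rw [List.nil_append] at hmark
  have hcount := count_phase hPre (attBy (knightsOf n T0)) (cellsOf n) (nodup_cellsOf n) hcells
    ((cellsOf n).foldl (stepA n) T0) 0 hmark.1
    (fun c hc => by
      obtain ⟨⟨h1, h2⟩, h3, h4⟩ := hcells c hc
      exact hmark.2 c.1 c.2 h1 h2 h3 h4)
  rw [hcount, zero_add]
  refine congrArg _ (List.countP_congr ?_)
  intro c hc
  obtain ⟨⟨h1, h2⟩, h3, h4⟩ := hcells c hc
  have hv := pv_val hPre h1 h2 h3 h4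
  have hptw : ∀ x : Int × Int,
      decide (x ∈ (cellsOf n).filter (fun c => decide (pvGet T0 c.1 c.2 = 1)))
        = PySem.Set.contains (knightsB n T0) x := by
    intro x
    rw [Bool.eq_iff_iff]
    simp only [decide_eq_true_eq]
    rw [PySem.Set.contains_iff]
    exact (knight_set_mem n T0 x).symm
  simp only [decide_eq_true_eq]
  unfold condB
  rw [markVal_mem23, attBy_symm, knights_eq hPre]
  have hiff : (pvMoves.any (fun m =>
        decide ((c.1 + m.1, c.2 + m.2) ∈ (cellsOf n).filter (fun c => decide (pvGet T0 c.1 c.2 = 1)))) = true)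
      ↔ (pvMoves.any (fun m => PySem.Set.contains (knightsB n T0) (c.1 + m.1, c.2 + m.2)) = true) := by
    simp only [hptw]
  constructor
  · rintro (h | ⟨-, h2'⟩)
    · exact absurd h (by omega)
    · exact hiff.1 h2'
  · intro h
    exact Or.inr ⟨hv, hiff.2 h⟩
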